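-- pv_equiv track=rewrite | github.com/ignirtoq/homeworld | core.py | _gen_shutdown_error_msg
-- ===== SOURCE A (Python) =====
-- def _gen_shutdown_error_msg(sp_down, gc_down, r_down):
--   err = 'Unable to shut down the following components: '
--   needComma = False
--   if not sp_down:
--     err += ', Spaceport' if needComma else 'Spaceport'
--     needComma = True
--   if not gc_down:
--     err += ', GroundControl' if needComma else 'GroundControl'
--     needComma = True
--   for i in range(len(r_down)):
--     if not r_down[i]:
--       if needComma: err += ', '
--       err += 'Relay ' + str(i)
--       needComma = True
--   return err
-- ===== SOURCE B (Python) =====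
-- def _gen_shutdown_error_msg(sp_down, gc_down, r_down):
--     # Build the message back-to-front: walk the relays from the last to the first,
--     # collecting the pieces in reverse order; a ', ' separator is emitted exactly
--     # when some component already follows (the collected suffix is non-empty).
--     out = []
--     for i in range(len(r_down) - 1, -1, -1):
--         if not r_down[i]:
--             if out:
--                 out.append(', ')
--             out.append('Relay ' + str(i))
--     if not gc_down:
--         if out:
--             out.append(', ')
--         out.append('GroundControl')
--     if not sp_down:
--         if out:
--             out.append(', ')
--         out.append('Spaceport')
--     return 'Unable to shut down the following components: ' + ''.join(reversed(out))
-- ===== Notes on version B (the rewrite author's own statement) =====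
-- stated objective: alternative
-- what changed: Builds the message back-to-front, walking the relays from the last to the first and prepending components, with the separator decided by whether the already-built suffix is empty, instead of A's forward pass with a needComma flag and per-branch comma prefixes.
import Mathlib
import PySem

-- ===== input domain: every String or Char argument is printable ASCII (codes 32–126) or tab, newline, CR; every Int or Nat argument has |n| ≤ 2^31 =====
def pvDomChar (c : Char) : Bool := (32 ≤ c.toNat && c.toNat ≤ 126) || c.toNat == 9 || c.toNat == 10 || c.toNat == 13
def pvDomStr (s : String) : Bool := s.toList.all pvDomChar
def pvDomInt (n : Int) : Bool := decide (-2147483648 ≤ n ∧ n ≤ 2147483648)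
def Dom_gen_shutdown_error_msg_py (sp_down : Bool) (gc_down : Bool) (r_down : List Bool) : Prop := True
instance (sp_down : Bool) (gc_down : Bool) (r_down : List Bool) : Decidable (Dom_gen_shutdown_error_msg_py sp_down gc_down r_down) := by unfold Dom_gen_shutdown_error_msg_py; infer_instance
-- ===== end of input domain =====

-- B builds the message back-to-front (suffix-first over the relays), collecting pieces in
-- reverse order and joining once, with each separator decided by whether some component
-- already follows, instead of A's forward needComma flag (alternative).


-- ===== PORT A =====
-- the for-loop over range(len(r_down)): structural recursion carrying the current
-- index i, the accumulated err string and the needComma flag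
def aLoop (r : List Bool) (i : Int) (err : String) (needComma : Bool) : String :=
  match r with
  | [] => err
  | b :: rest =>
    if !b then
      aLoop rest (i + 1) ((if needComma then err ++ ", " else err) ++ ("Relay " ++ PySem.Int.toStr i)) true
    else
      aLoop rest (i + 1) err needComma

def gen_shutdown_error_msg_py (sp_down : Bool) (gc_down : Bool) (r_down : List Bool) : String :=
  let err := "Unable to shut down the following components: "
  let needComma := false
  let (err, needComma) :=
    if !sp_down then (err ++ (if needComma then ", Spaceport" else "Spaceport"), true)
    else (err, needComma)
  let (err, needComma) :=
    if !gc_down then (err ++ (if needComma then ", GroundControl" else "GroundControl"), true)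
    else (err, needComma)
  aLoop r_down 0 err needComma

-- ===== PORT B =====
-- "if out: out.append(', ')"; "out.append(name)"
def bAdd (out : List String) (name : String) : List String :=
  (if out.isEmpty then out else out ++ [", "]) ++ [name]

-- the backward loop 'for i in range(len(r_down)-1, -1, -1)': a walk over the
-- reversed enumeration of r_down, threading the python list 'out'
def bLoop (ps : List (Int × Bool)) (out : List String) : List String :=
  match ps with
  | [] => out
  | (i, b) :: rest => bLoop rest (if !b then bAdd out ("Relay " ++ PySem.Int.toStr i) else out)

def gen_shutdown_error_msg_py_alt (sp_down : Bool) (gc_down : Bool) (r_down : List Bool) : String :=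
  let out := bLoop ((PySem.List.enumerate r_down).reverse) []
  let out := if !gc_down then bAdd out "GroundControl" else out
  let out := if !sp_down then bAdd out "Spaceport" else out
  "Unable to shut down the following components: " ++ PySem.Str.join "" out.reverse

-- ===== PRECONDITION & SPEC =====
def Spec_gen_shutdown_error_msg_py (sp_down : Bool) (gc_down : Bool) (r_down : List Bool) (out : String) : Prop := out = gen_shutdown_error_msg_py_alt sp_down gc_down r_down
instance (sp_down : Bool) (gc_down : Bool) (r_down : List Bool) (out : String) : Decidable (Spec_gen_shutdown_error_msg_py sp_down gc_down r_down out) := by unfold Spec_gen_shutdown_error_msg_py; infer_instance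

-- ===== CLAIM (what is proved, stated in full; the proofs are below) =====
def Claim_equal_gen_shutdown_error_msg_py : Prop := ∀ (sp_down : Bool) (gc_down : Bool) (r_down : List Bool), Dom_gen_shutdown_error_msg_py sp_down gc_down r_down → Spec_gen_shutdown_error_msg_py sp_down gc_down r_down (gen_shutdown_error_msg_py sp_down gc_down r_down)

-- ===== LEMMAS AND PROOFS =====

-- proof-side description of the suffix message built from the relays r with first index i
def bRelays (r : List Bool) (i : Int) : String :=
  match r with
  | [] => ""
  | b :: rest =>
    let msg := bRelays rest (i + 1)
    if !b then
      if msg = "" then "Relay " ++ PySem.Int.toStr i else "Relay " ++ PySem.Int.toStr i ++ ", " ++ msg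
    else msg

-- ", " ++ s if s is non-empty: what A's needComma=true loop appends for a suffix s
def pref (s : String) : String := if s = "" then "" else ", " ++ s

-- join of the reversed piece list: the string the pieces in 'out' denote
def J (out : List String) : String := PySem.Str.join "" out.reverse

theorem relay_ne (i : Int) (t : String) : ("Relay " ++ PySem.Int.toStr i ++ t) ≠ "" := by
  intro h
  have h2 := congrArg String.toList h
  simp [String.toList_append] at h2

theorem relay_ne' (i : Int) : ("Relay " ++ PySem.Int.toStr i) ≠ "" := by
  intro h
  have h2 := congrArg String.toList h
  simp [String.toList_append] at h2

theorem aLoop_true (r : List Bool) (i : Int) (err : String) :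
    aLoop r i err true = err ++ pref (bRelays r i) := by
  induction r generalizing i err with
  | nil => simp [aLoop, bRelays, pref]
  | cons b rest ih =>
    cases b with
    | false =>
      simp only [aLoop, bRelays, Bool.not_false, if_pos]
      rw [ih]
      by_cases ht : bRelays rest (i + 1) = ""
      · simp [ht, pref, relay_ne' i, String.append_assoc]
      · simp [ht, pref, relay_ne i, String.append_assoc]
    | true =>
      simp only [aLoop, bRelays, Bool.not_true, if_neg, Bool.false_eq_true, not_false_eq_true]
      exact ih (i+1) err

theorem aLoop_false (r : List Bool) (i : Int) (err : String) :
    aLoop r i err false = err ++ bRelays r i := by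
  induction r generalizing i err with
  | nil => simp [aLoop, bRelays]
  | cons b rest ih =>
    cases b with
    | false =>
      simp only [aLoop, bRelays, Bool.not_false, if_pos]
      rw [aLoop_true]
      by_cases ht : bRelays rest (i + 1) = ""
      · simp [ht, pref]
      · simp [ht, pref, String.append_assoc]
    | true =>
      simp only [aLoop, bRelays, Bool.not_true, if_neg, Bool.false_eq_true, not_false_eq_true]
      exact ih (i+1) err

theorem bAdd_ne_nil (out : List String) (name : String) : bAdd out name ≠ [] := by
  simp [bAdd]

theorem J_bAdd_nil (name : String) : J (bAdd [] name) = name := by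
  apply String.toList_inj.mp
  simp [J, bAdd, PySem.Str.toList_join, PySem.Chars.join_singleton]

theorem J_bAdd_cons (out : List String) (name : String) (h : out ≠ []) :
    J (bAdd out name) = name ++ ", " ++ J out := by
  obtain ⟨z, zs, hz⟩ := List.exists_cons_of_ne_nil (fun hr => h (List.reverse_eq_nil_iff.mp hr) : out.reverse ≠ [])
  have hne : out.isEmpty = false := by simp [List.isEmpty_iff, h]
  apply String.toList_inj.mp
  simp only [J, bAdd, hne, Bool.false_eq_true, if_false]
  rw [show (out ++ [", "] ++ [name]).reverse = name :: ", " :: out.reverse by simp, hz]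
  simp [PySem.Str.toList_join, List.map_cons, PySem.Chars.join_cons_cons,
    String.toList_append, List.append_assoc]

theorem bLoop_append (ps qs : List (Int × Bool)) (out : List String) :
    bLoop (ps ++ qs) out = bLoop qs (bLoop ps out) := by
  induction ps generalizing out with
  | nil => simp [bLoop]
  | cons p rest ih => cases p; simp [bLoop, ih]

-- the loop's result for the relays r with first index i
def bS (r : List Bool) (i : Int) : List String := bLoop ((PySem.List.enumerate r i).reverse) []

theorem bS_cons (b : Bool) (rest : List Bool) (i : Int) :
    bS (b :: rest) i = if !b then bAdd (bS rest (i + 1)) ("Relay " ++ PySem.Int.toStr i) else bS rest (i + 1) := by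
  simp [bS, PySem.List.enumerate_cons, bLoop_append, bLoop]

theorem bS_bridge (r : List Bool) (i : Int) :
    J (bS r i) = bRelays r i ∧ (bS r i = [] ↔ bRelays r i = "") := by
  induction r generalizing i with
  | nil =>
    constructor
    · apply String.toList_inj.mp
      simp [bS, J, bRelays, PySem.List.enumerate_nil, bLoop, PySem.Str.toList_join, PySem.Chars.join_nil]
    · simp [bS, PySem.List.enumerate_nil, bLoop, bRelays]
  | cons b rest ih =>
    obtain ⟨hJ, hiff⟩ := ih (i + 1)
    cases b with
    | false =>
      rw [bS_cons]
      simp only [Bool.not_false, if_pos]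
      by_cases h : bS rest (i + 1) = []
      · have hb : bRelays rest (i + 1) = "" := hiff.mp h
        constructor
        · rw [h, J_bAdd_nil]
          simp [bRelays, hb]
        · simp [bAdd_ne_nil, bRelays, hb, relay_ne' i]
      · have hb : bRelays rest (i + 1) ≠ "" := fun hc => h (hiff.mpr hc)
        constructor
        · rw [J_bAdd_cons _ _ h, hJ]
          simp [bRelays, hb]
        · simp [bAdd_ne_nil, bRelays, hb, relay_ne i]
    | true =>
      rw [bS_cons]
      simpa [bRelays] using ⟨hJ, hiff⟩

-- ===== VERDICT (by name: the statement is the Claim_ definition above) =====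
theorem gen_shutdown_error_msg_py_spec : Claim_equal_gen_shutdown_error_msg_py := by
  intro sp gc r _
  obtain ⟨hJ, hiff⟩ := bS_bridge r 0
  unfold Spec_gen_shutdown_error_msg_py gen_shutdown_error_msg_py gen_shutdown_error_msg_py_alt
  have hS : bLoop ((PySem.List.enumerate r).reverse) [] = bS r 0 := rfl
  cases sp <;> cases gc <;>
    simp only [Bool.not_false, Bool.not_true, if_true, Bool.false_eq_true, if_false, hS]
  · -- sp_down = false, gc_down = false
    rw [aLoop_true]
    by_cases h : bS r 0 = []
    · rw [h, show (PySem.Str.join "" (bAdd (bAdd [] "GroundControl") "Spaceport").reverse : String) =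
          J (bAdd (bAdd [] "GroundControl") "Spaceport") from rfl,
        J_bAdd_cons _ _ (bAdd_ne_nil _ _), J_bAdd_nil]
      simp [pref, hiff.mp h]
    · rw [show (PySem.Str.join "" (bAdd (bAdd (bS r 0) "GroundControl") "Spaceport").reverse : String) =
          J (bAdd (bAdd (bS r 0) "GroundControl") "Spaceport") from rfl,
        J_bAdd_cons _ _ (bAdd_ne_nil _ _), J_bAdd_cons _ _ h, hJ]
      have hb : bRelays r 0 ≠ "" := fun hc => h (hiff.mpr hc)
      rw [pref, if_neg hb]
      simp only [← String.append_assoc]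
      congr 1
  · -- sp_down = false, gc_down = true
    rw [aLoop_true]
    by_cases h : bS r 0 = []
    · rw [h, show (PySem.Str.join "" (bAdd [] "Spaceport").reverse : String) = J (bAdd [] "Spaceport") from rfl, J_bAdd_nil]
      simp [pref, hiff.mp h]
    · rw [show (PySem.Str.join "" (bAdd (bS r 0) "Spaceport").reverse : String) = J (bAdd (bS r 0) "Spaceport") from rfl,
        J_bAdd_cons _ _ h, hJ]
      have hb : bRelays r 0 ≠ "" := fun hc => h (hiff.mpr hc)
      rw [pref, if_neg hb]
      simp only [← String.append_assoc]
  · -- sp_down = true, gc_down = false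
    rw [aLoop_true]
    by_cases h : bS r 0 = []
    · rw [h, show (PySem.Str.join "" (bAdd [] "GroundControl").reverse : String) = J (bAdd [] "GroundControl") from rfl, J_bAdd_nil]
      simp [pref, hiff.mp h]
    · rw [show (PySem.Str.join "" (bAdd (bS r 0) "GroundControl").reverse : String) = J (bAdd (bS r 0) "GroundControl") from rfl,
        J_bAdd_cons _ _ h, hJ]
      have hb : bRelays r 0 ≠ "" := fun hc => h (hiff.mpr hc)
      rw [pref, if_neg hb]
      simp only [← String.append_assoc]
  · -- sp_down = true, gc_down = true
    rw [aLoop_false, ← hJ]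
    rfl
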